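-- pv_equiv track=rewrite | github.com/be4rpooh02/onlinejudge | 프로그래머스/lv0/120878. 유한소수 판별하기/유한소수 판별하기.py | solution
-- ===== SOURCE A (Python) =====
-- def solution(a, b):
--     # gcd
--     for i in range(min(a,b),0,-1):
--         if(not a%i and not b%i):
--             b=int(b/i)
--             break
--
--     # prime factorial
--     if(b > 1):
--         i, pf=2, []
--
--         while(i<=b):
--             if(not b%i):
--                 pf.append(i)
--                 b=b/i
--             else:
--                 i=i+1
--
--         # pf가 2, 5의 부분집합이면 기약분수
--         answer = 1 if(not set(pf)-set([2, 5])) else 2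
--     else:
--         # 분모가 1이면 정수이므로 기약분수
--         answer = 1
--     return answer
-- ===== SOURCE B (Python) =====
-- def solution(a, b):
--     if a > 0 and b > 0:
--         g, r = a, b
--         while r:
--             g, r = r, g % r
--         b //= g
--     if b <= 1:
--         return 1
--     while b % 2 == 0:
--         b //= 2
--     while b % 5 == 0:
--         b //= 5
--     return 1 if b == 1 else 2
-- ===== Notes on version B (the rewrite author's own statement) =====
-- stated objective: faster
-- what changed: Replaces A's downward trial scan for the gcd and its full trial-division prime factorisation (collecting the factor list and set-subtracting {2,5}) by Euclid's algorithm followed by dividing out the factors 2 and 5 and testing whether 1 remains.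
import Mathlib
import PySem

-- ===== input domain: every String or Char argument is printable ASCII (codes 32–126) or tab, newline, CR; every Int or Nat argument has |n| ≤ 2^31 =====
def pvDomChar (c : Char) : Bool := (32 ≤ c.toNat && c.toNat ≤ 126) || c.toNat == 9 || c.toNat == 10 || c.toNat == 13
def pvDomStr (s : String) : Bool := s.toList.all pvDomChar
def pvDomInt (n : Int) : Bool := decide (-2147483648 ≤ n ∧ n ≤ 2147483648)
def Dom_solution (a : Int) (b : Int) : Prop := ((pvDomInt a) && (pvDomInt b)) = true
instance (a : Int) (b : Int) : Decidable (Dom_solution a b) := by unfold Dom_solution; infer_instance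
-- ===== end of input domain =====

-- B replaces A's downward trial-division gcd scan and full trial-division prime
-- factorisation by Euclid's algorithm plus stripping the factors 2 and 5 (objective: faster).

-- termination helper for the loop ports (cited by their decreasing_by)
theorem pv_ediv_lt (a b : Int) (h : 0 < a) (h2 : 1 < b) : a / b < a := by
  apply Int.ediv_lt_of_lt_mul (by omega)
  nlinarith

-- ===== PORT A =====
-- 'for i in range(min(a,b),0,-1): if not a%i and not b%i: b=int(b/i); break' as a countdown
-- recursion on i; int(b/i) is PySem.Int.truncdiv (exact: |a|,|b| ≤ 2^31 < 2^53).
def aGcdLoop (a b i : Int) : Int :=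
  if 0 < i then
    if PySem.Int.mod a i == 0 && PySem.Int.mod b i == 0 then PySem.Int.truncdiv b i
    else aGcdLoop a b (i - 1)
  else b
termination_by i.toNat
decreasing_by omega

-- 'while i<=b: if not b%i: pf.append(i); b=b/i else: i=i+1'; Python's b=b/i is float true
-- division but always exact here (i divides b, |b| ≤ 2^31 < 2^53), modelled by truncdiv.
-- The conjunct '2 ≤ i' is a totality guard only: the loop is entered with i = 2 and i never
-- decreases, so it holds on every reached state.
def aFacLoop (i b : Int) (pf : List Int) : List Int :=
  if h : 2 ≤ i ∧ i ≤ b then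
    if PySem.Int.mod b i == 0 then aFacLoop i (PySem.Int.truncdiv b i) (pf ++ [i])
    else aFacLoop (i + 1) b pf
  else pf
termination_by ((b.toNat, (b - i).toNat) : Nat ×ₗ Nat)
decreasing_by
  · apply Prod.Lex.left
    have h2 : PySem.Int.truncdiv b i = b / i := by
      simp [PySem.Int.truncdiv, Int.tdiv_eq_ediv_of_nonneg (by omega : (0:Int) ≤ b)]
    have h3 : b / i < b := pv_ediv_lt _ _ (by omega) (by omega)
    rw [h2]; omega
  · rename_i hm
    have hne : i ≠ b := by
      intro he
      subst he
      simp [PySem.Int.mod_eq_zero_iff_dvd] at hm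
    apply Prod.Lex.right
    omega

def solution (a : Int) (b : Int) : Int :=
  let b1 := aGcdLoop a b (min a b)
  if 1 < b1 then
    let pf := aFacLoop 2 b1 []
    if (PySem.Set.diff (PySem.Set.ofList pf) (PySem.Set.ofList [2, 5])).isEmpty then 1 else 2
  else 1

-- ===== PORT B =====
-- 'g, r = a, b; while r: g, r = r, g % r'
def euclidLoop (g r : Int) : Int :=
  if r ≠ 0 then euclidLoop r (PySem.Int.mod g r) else g
termination_by r.natAbs
decreasing_by
  rcases lt_trichotomy r 0 with h | h | h
  · have := PySem.Int.mod_neg_bounds g h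
    omega
  · omega
  · have h1 := PySem.Int.mod_nonneg g h
    have h2 := PySem.Int.mod_lt g h
    omega

-- 'while b % k == 0: b //= k' (called with k = 2 and k = 5 on b ≥ 2 only; the conjunct
-- '2 ≤ k ∧ 0 < b' is a totality guard that holds on every reached state).
def stripLoop (k b : Int) : Int :=
  if h : 2 ≤ k ∧ 0 < b ∧ PySem.Int.mod b k == 0 then stripLoop k (PySem.Int.floordiv b k)
  else b
termination_by b.toNat
decreasing_by
  have h1 : PySem.Int.floordiv b k = b / k := PySem.Int.floordiv_eq_ediv_of_pos (by omega)
  have h3 : b / k < b := pv_ediv_lt _ _ (by omega) (by omega)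
  rw [h1]; omega

def solution_alt (a : Int) (b : Int) : Int :=
  let b2 := if 0 < a ∧ 0 < b then PySem.Int.floordiv b (euclidLoop a b) else b
  if b2 ≤ 1 then 1
  else if stripLoop 5 (stripLoop 2 b2) == 1 then 1 else 2

-- ===== PRECONDITION & SPEC =====
def Spec_solution (a : Int) (b : Int) (out : Int) : Prop := out = solution_alt a b
instance (a : Int) (b : Int) (out : Int) : Decidable (Spec_solution a b out) := by unfold Spec_solution; infer_instance

-- ===== CLAIM (what is proved, stated in full; the proofs are below) =====
def Claim_equal_solution : Prop := ∀ (a : Int) (b : Int), Dom_solution a b → Spec_solution a b (solution a b)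

-- ===== LEMMAS AND PROOFS =====

-- B's Euclid loop computes gcd.
theorem euclidLoop_eq_gcd (g r : Int) : 0 ≤ g → 0 ≤ r → euclidLoop g r = (Int.gcd g r : Int) := by
  induction g, r using euclidLoop.induct with
  | case1 g r hne ih =>
    intro hg hr
    have hr' : 0 < r := lt_of_le_of_ne hr (Ne.symm hne)
    rw [euclidLoop, if_pos hne]
    rw [PySem.Int.mod_eq_emod_of_pos hr'] at ih ⊢
    rw [ih hr (Int.emod_nonneg g (by omega)), Int.gcd_comm, Int.gcd_emod]
  | case2 g r hne =>
    intro hg hr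
    rw [euclidLoop, if_neg hne]
    have : r = 0 := by omega
    subst this
    simp [Int.gcd, Int.natAbs_of_nonneg hg]

-- A's downward scan, started at or above the gcd of two positives, stops exactly at the gcd.
theorem aGcdLoop_eq (a b i : Int) : 0 < a → 0 < b → (Int.gcd a b : Int) ≤ i →
    aGcdLoop a b i = PySem.Int.truncdiv b (Int.gcd a b) := by
  refine aGcdLoop.induct a b
    (motive := fun i => 0 < a → 0 < b → (Int.gcd a b : Int) ≤ i →
      aGcdLoop a b i = PySem.Int.truncdiv b (Int.gcd a b)) ?_ ?_ ?_ i
  · intro i hi hm ha hb hgi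
    have hma := (Bool.and_eq_true _ _).mp hm |>.1
    have hmb := (Bool.and_eq_true _ _).mp hm |>.2
    have hda : i ∣ a := (PySem.Int.mod_eq_zero_iff_dvd a i).mp (by simpa using hma)
    have hdb : i ∣ b := (PySem.Int.mod_eq_zero_iff_dvd b i).mp (by simpa using hmb)
    have hg0 : 0 < Int.gcd a b := Int.gcd_pos_of_ne_zero_left b (by omega)
    have hig : i ≤ (Int.gcd a b : Int) := by
      have h1 : (i.toNat : Int) ∣ a := by rwa [Int.toNat_of_nonneg (by omega)]
      have h2 : (i.toNat : Int) ∣ b := by rwa [Int.toNat_of_nonneg (by omega)]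
      have h3 : i.toNat ∣ Int.gcd a b := Int.dvd_gcd h1 h2
      have h4 := Nat.le_of_dvd hg0 h3
      omega
    have he : i = (Int.gcd a b : Int) := le_antisymm hig hgi
    rw [aGcdLoop, if_pos hi, if_pos hm, he]
  · intro i hi hm ih ha hb hgi
    rw [aGcdLoop, if_pos hi, if_neg hm]
    have hg0 : 0 < Int.gcd a b := Int.gcd_pos_of_ne_zero_left b (by omega)
    have hne : i ≠ (Int.gcd a b : Int) := by
      intro he
      apply hm
      have h1 : PySem.Int.mod a i = 0 := by
        rw [he]; exact (PySem.Int.mod_eq_zero_iff_dvd _ _).mpr (Int.gcd_dvd_left a b)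
      have h2 : PySem.Int.mod b i = 0 := by
        rw [he]; exact (PySem.Int.mod_eq_zero_iff_dvd _ _).mpr (Int.gcd_dvd_right a b)
      simp [h1, h2]
    exact ih ha hb (by omega)
  · intro i hi ha hb hgi
    have hg0 : 0 < Int.gcd a b := Int.gcd_pos_of_ne_zero_left b (by omega)
    omega

-- stripLoop leaves 1 fixed.
theorem stripLoop_one (k : Int) : stripLoop k 1 = 1 := by
  rw [stripLoop]
  have : ¬ ((2:Int) ≤ k ∧ (0:Int) < 1 ∧ PySem.Int.mod 1 k == 0) := by
    rintro ⟨hk, -, hm⟩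
    have : k ∣ 1 := (PySem.Int.mod_eq_zero_iff_dvd 1 k).mp (by simpa using hm)
    have := Int.le_of_dvd one_pos this
    omega
  rw [dif_neg this]

-- stripLoop does nothing when k does not divide b.
theorem stripLoop_of_not_dvd (k b : Int) (h : ¬ k ∣ b) : stripLoop k b = b := by
  rw [stripLoop]
  have : ¬ ((2:Int) ≤ k ∧ 0 < b ∧ PySem.Int.mod b k == 0) := by
    rintro ⟨-, -, hm⟩
    exact h ((PySem.Int.mod_eq_zero_iff_dvd b k).mp (by simpa using hm))
  rw [dif_neg this]

-- one unfolding of stripLoop on a divisible positive b.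
theorem stripLoop_step (k b : Int) (hk : 2 ≤ k) (hb : 0 < b) (h : k ∣ b) :
    stripLoop k b = stripLoop k (b / k) := by
  rw [stripLoop]
  have hm : (PySem.Int.mod b k == 0) = true := by
    simpa using (PySem.Int.mod_eq_zero_iff_dvd b k).mpr h
  rw [dif_pos ⟨hk, hb, hm⟩, PySem.Int.floordiv_eq_ediv_of_pos (by omega)]

-- a divisor coprime to k survives stripLoop, and positivity is preserved.
theorem stripLoop_dvd (k b : Int) (i : Int) (hc : IsCoprime i k) :
    0 < b → i ∣ b → i ∣ stripLoop k b ∧ 0 < stripLoop k b := by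
  refine stripLoop.induct k
    (motive := fun b => 0 < b → i ∣ b → i ∣ stripLoop k b ∧ 0 < stripLoop k b) ?_ ?_ b
  · intro b h ih hb hd
    obtain ⟨hk, hb', hm⟩ := h
    have hkd : k ∣ b := (PySem.Int.mod_eq_zero_iff_dvd b k).mp (by simpa using hm)
    rw [stripLoop, dif_pos ⟨hk, hb', hm⟩]
    have hfd : PySem.Int.floordiv b k = b / k := PySem.Int.floordiv_eq_ediv_of_pos (by omega)
    rw [hfd] at ih ⊢
    obtain ⟨c, rfl⟩ := hkd
    rw [Int.mul_ediv_cancel_left _ (by omega : k ≠ 0)] at ih ⊢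
    exact ih (by nlinarith) (hc.dvd_of_dvd_mul_left hd)
  · intro b h hb hd
    rw [stripLoop, dif_neg h]
    exact ⟨hd, hb⟩

-- the invariant-carrying characterisation of A's factorisation loop: all collected factors
-- lie in {2,5} iff stripping the 2s and 5s out of b leaves 1.
theorem aFacLoop_all (i b : Int) (pf : List Int) : 2 ≤ i → 1 ≤ b →
    (∀ j : Int, 2 ≤ j → j < i → ¬ j ∣ b) →
    (aFacLoop i b pf).all (fun x => x == 2 || x == 5)
      = (pf.all (fun x => x == 2 || x == 5) && (stripLoop 5 (stripLoop 2 b) == 1)) := by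
  induction i, b, pf using aFacLoop.induct with
  | case1 i b pf h hm ih =>
    intro h2 hb hinv
    obtain ⟨-, hib⟩ := h
    have hd : i ∣ b := (PySem.Int.mod_eq_zero_iff_dvd b i).mp (by simpa using hm)
    have htd : PySem.Int.truncdiv b i = b / i := by
      simp [PySem.Int.truncdiv, Int.tdiv_eq_ediv_of_nonneg (by omega : (0:Int) ≤ b)]
    rw [aFacLoop, dif_pos ⟨h2, hib⟩, if_pos hm]
    rw [htd] at ih ⊢
    obtain ⟨c, rfl⟩ := hd
    have hc1 : 1 ≤ c := by nlinarith
    rw [Int.mul_ediv_cancel_left _ (by omega : i ≠ 0)] at ih ⊢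
    have hcdvd : ∀ j : Int, j ∣ c → j ∣ i * c := fun j hj => hj.mul_left i
    have hinv' : ∀ j : Int, 2 ≤ j → j < i → ¬ j ∣ c := fun j ha hb hj => hinv j ha hb (hcdvd j hj)
    rw [ih h2 hc1 hinv', List.all_append]
    by_cases hi2 : i = 2
    · subst hi2
      rw [stripLoop_step 2 (2 * c) (by omega) (by omega) ⟨c, rfl⟩,
        Int.mul_ediv_cancel_left _ (by omega : (2:Int) ≠ 0)]
      simp [Bool.and_comm]
    · by_cases hi5 : i = 5
      · subst hi5
        have hnd2 : ¬ (2:Int) ∣ 5 * c := hinv 2 (by omega) (by omega)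
        have hnd2c : ¬ (2:Int) ∣ c := fun hx => hnd2 (hx.mul_left 5)
        rw [stripLoop_of_not_dvd 2 _ hnd2, stripLoop_of_not_dvd 2 _ hnd2c,
          stripLoop_step 5 (5 * c) (by omega) (by omega) ⟨c, rfl⟩,
          Int.mul_ediv_cancel_left _ (by omega : (5:Int) ≠ 0)]
        simp [Bool.and_comm]
      · -- i ∉ {2,5}: both sides are false
        have hnd2i : ¬ (2:Int) ∣ i := by
          intro hx
          exact hinv 2 (by omega) (by omega) (hx.mul_right c)
        have hnd5i : ¬ (5:Int) ∣ i := by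
          intro hx
          have hgt : 5 < i := by
            obtain ⟨m, rfl⟩ := hx
            omega
          exact hinv 5 (by omega) hgt (hx.mul_right c)
        have hcop2 : IsCoprime i 2 := ((Int.prime_two.coprime_iff_not_dvd).mpr hnd2i).symm
        have p5 : Prime (5:Int) := by
          rw [Int.prime_iff_natAbs_prime]; norm_num
        have hcop5 : IsCoprime i 5 := ((p5.coprime_iff_not_dvd).mpr hnd5i).symm
        have hs2 := stripLoop_dvd 2 (i * c) i hcop2 (by nlinarith) ⟨c, rfl⟩
        have hs5 := stripLoop_dvd 5 (stripLoop 2 (i * c)) i hcop5 hs2.2 hs2.1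
        have hne1 : stripLoop 5 (stripLoop 2 (i * c)) ≠ 1 := by
          intro he
          rw [he] at hs5
          have := Int.le_of_dvd one_pos hs5.1
          omega
        have hPi : ((i == 2 || i == 5) : Bool) = false := by
          simp [hi2, hi5]
        simp [hPi, hne1]
  | case2 i b pf h hm ih =>
    intro h2 hb hinv
    obtain ⟨-, hib⟩ := h
    have hnd : ¬ i ∣ b := fun hx => by
      apply hm
      simpa using (PySem.Int.mod_eq_zero_iff_dvd b i).mpr hx
    rw [aFacLoop, dif_pos ⟨h2, hib⟩, if_neg hm]
    exact ih (by omega) hb (by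
      intro j hj1 hj2
      rcases lt_or_eq_of_le (by omega : j ≤ i) with hlt | heq
      · exact hinv j hj1 hlt
      · subst heq; exact hnd)
  | case3 i b pf h =>
    intro h2 hb hinv
    have hbi : b < i := by omega
    have hb1 : b = 1 := by
      by_contra hne
      exact hinv b (by omega) (by omega) (dvd_refl b)
    subst hb1
    rw [aFacLoop, dif_neg h, stripLoop_one, stripLoop_one]
    simp

-- Python's 'not set(pf) - set([2,5])' is 'every element of pf is 2 or 5'.
theorem setdiff_isEmpty (pf : List Int) :
    (PySem.Set.diff (PySem.Set.ofList pf) (PySem.Set.ofList [2, 5])).isEmpty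
      = pf.all (fun x => x == 2 || x == 5) := by
  rw [Bool.eq_iff_iff, List.isEmpty_iff, List.eq_nil_iff_forall_not_mem]
  simp only [PySem.Set.mem_diff, PySem.Set.mem_ofList, List.all_eq_true]
  constructor
  · intro h x hx
    have hx2 := h x
    push Not at hx2
    have := hx2 hx
    simpa using this
  · rintro h x ⟨hx, hn⟩
    exact hn (by simpa using h x hx)

-- the two reduced denominators coincide.
theorem reduced_eq (a b : Int) :
    aGcdLoop a b (min a b)
      = (if 0 < a ∧ 0 < b then PySem.Int.floordiv b (euclidLoop a b) else b) := by
  by_cases h : 0 < a ∧ 0 < b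
  · obtain ⟨ha, hb⟩ := h
    have hg0 : 0 < Int.gcd a b := Int.gcd_pos_of_ne_zero_left b (by omega)
    have hgpos : (0:Int) < (Int.gcd a b : Int) := by exact_mod_cast hg0
    have hgle : (Int.gcd a b : Int) ≤ min a b := by
      have h1 := Int.le_of_dvd ha (Int.gcd_dvd_left a b)
      have h2 := Int.le_of_dvd hb (Int.gcd_dvd_right a b)
      omega
    rw [aGcdLoop_eq a b _ ha hb hgle, if_pos ⟨ha, hb⟩,
      euclidLoop_eq_gcd a b (by omega) (by omega),
      PySem.Int.floordiv_eq_ediv_of_pos hgpos]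
    simp [PySem.Int.truncdiv, Int.tdiv_eq_ediv_of_nonneg (by omega : (0:Int) ≤ b)]
  · rw [if_neg h, aGcdLoop, if_neg (by omega)]

-- assembling: both programs compute the same function of the reduced denominator.
theorem branch_eq (c : Int) :
    (if 1 < c then
        (if (PySem.Set.diff (PySem.Set.ofList (aFacLoop 2 c [])) (PySem.Set.ofList [2, 5])).isEmpty
         then (1:Int) else 2)
      else 1)
      = (if c ≤ 1 then 1 else if stripLoop 5 (stripLoop 2 c) == 1 then 1 else 2) := by
  by_cases h1 : 1 < c
  · rw [if_pos h1, if_neg (show ¬ c ≤ 1 by omega), setdiff_isEmpty,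
      aFacLoop_all 2 c [] (by omega) (by omega) (by intro j hj1 hj2; omega)]
    simp
  · rw [if_neg h1, if_pos (show c ≤ 1 by omega)]

theorem solution_eq_alt (a b : Int) : solution a b = solution_alt a b := by
  calc solution a b
      = (if 1 < aGcdLoop a b (min a b) then
          (if (PySem.Set.diff (PySem.Set.ofList (aFacLoop 2 (aGcdLoop a b (min a b)) []))
                (PySem.Set.ofList [2, 5])).isEmpty then (1:Int) else 2)
         else 1) := rfl
    _ = (if aGcdLoop a b (min a b) ≤ 1 then 1
         else if stripLoop 5 (stripLoop 2 (aGcdLoop a b (min a b))) == 1 then 1 else 2) :=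
        branch_eq _
    _ = (if (if 0 < a ∧ 0 < b then PySem.Int.floordiv b (euclidLoop a b) else b) ≤ 1 then 1
         else if stripLoop 5 (stripLoop 2
            (if 0 < a ∧ 0 < b then PySem.Int.floordiv b (euclidLoop a b) else b)) == 1
         then 1 else 2) := by rw [reduced_eq]
    _ = solution_alt a b := rfl

-- ===== VERDICT (by name: the statement is the Claim_ definition above) =====
theorem solution_spec : Claim_equal_solution := by
  intro a b _
  unfold Spec_solution
  exact solution_eq_alt a b
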